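-- pv_equiv track=rewrite | github.com/sofasolver/cybertalent_ctf_2023 | 2_4_4_bits_fibonacci_article.py | verify_prefix_free
-- ===== SOURCE A (Python) =====
-- def verify_prefix_free(rc):
--     for k in rc:
--         for c, w in rc.items():
--             if c == k:
--                 continue
--             if rc[k].startswith(w) or w.startswith(rc[k]):
--                 return False
--     return True
-- ===== SOURCE B (Python) =====
-- def verify_prefix_free(rc):
--     # Set-based: collect the codewords once; duplicates or any proper
--     # prefix present in the set mean the code is not prefix-free.
--     words = set(rc.values())
--     if len(words) < len(rc):
--         return False
--     for w in words:
--         for i in range(len(w)):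
--             if w[:i] in words:
--                 return False
--     return True
-- ===== Notes on version B (the rewrite author's own statement) =====
-- stated objective: alternative
-- what changed: Instead of comparing every pair of codewords with two nested scans over the dict, B builds the set of codewords once, detects duplicate codewords by a size comparison, and for each codeword checks its proper prefixes for membership in the set.
import Mathlib
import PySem

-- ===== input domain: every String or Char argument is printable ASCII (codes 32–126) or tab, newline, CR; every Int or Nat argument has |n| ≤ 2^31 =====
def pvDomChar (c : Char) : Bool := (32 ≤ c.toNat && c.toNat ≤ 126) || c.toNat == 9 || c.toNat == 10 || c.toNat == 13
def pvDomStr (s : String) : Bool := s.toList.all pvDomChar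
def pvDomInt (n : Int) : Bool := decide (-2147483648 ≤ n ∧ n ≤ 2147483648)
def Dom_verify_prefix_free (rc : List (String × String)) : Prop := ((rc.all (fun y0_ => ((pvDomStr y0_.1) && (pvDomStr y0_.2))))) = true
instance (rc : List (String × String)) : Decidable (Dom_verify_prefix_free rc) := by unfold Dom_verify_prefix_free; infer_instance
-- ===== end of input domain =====

-- B replaces A's all-pairs scan by a codeword set queried for duplicates and proper prefixes.

-- ===== PORT A =====
-- rc[k]: first-match dict lookup; k is always a key of rc, so the default "" is never used
def pvLook (rc : List (String × String)) (k : String) : String :=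
  ((PySem.Dict.mk rc).get? k).getD ""

def verify_prefix_free (rc : List (String × String)) : Bool :=
  -- for k in rc: for c, w in rc.items(): if c == k: continue; if rc[k].startswith(w) or w.startswith(rc[k]): return False
  !((rc.map Prod.fst).any (fun k =>
      rc.any (fun cw =>
        if cw.1 == k then false
        else PySem.Str.startswith (pvLook rc k) cw.2 || PySem.Str.startswith cw.2 (pvLook rc k))))

-- ===== PORT B =====
def verify_prefix_free_alt (rc : List (String × String)) : Bool :=
  let words : PySem.Set String := PySem.Set.ofList (rc.map Prod.snd)
  if words.length < rc.length then false
  else !(words.any (fun w =>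
    (List.range w.length).any (fun i =>
      PySem.Set.contains words (PySem.Str.slice w none (some (i : Int))))))

-- ===== PRECONDITION & SPEC =====
-- Pre_ excludes association lists with duplicate keys: they do not represent any Python dict
-- (A's argument is a dict, whose keys are distinct), so A is never run on such an input.
def Pre_verify_prefix_free (rc : List (String × String)) : Prop := (rc.map Prod.fst).Nodup
instance (rc : List (String × String)) : Decidable (Pre_verify_prefix_free rc) := by unfold Pre_verify_prefix_free; infer_instance
def pvWitness_verify_prefix_free : (List (String × String)) := [("a", "0"), ("b", "10")]

def Spec_verify_prefix_free (rc : List (String × String)) (out : Bool) : Prop := out = verify_prefix_free_alt rc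
instance (rc : List (String × String)) (out : Bool) : Decidable (Spec_verify_prefix_free rc out) := by unfold Spec_verify_prefix_free; infer_instance

-- ===== CLAIM (what is proved, stated in full; the proofs are below) =====
def Claim_equal_verify_prefix_free : Prop := ∀ (rc : List (String × String)), Dom_verify_prefix_free rc → Pre_verify_prefix_free rc → Spec_verify_prefix_free rc (verify_prefix_free rc)

-- ===== LEMMAS AND PROOFS =====

theorem pvLook_cons (a : String × String) (t : List (String × String)) (k : String) :
    pvLook (a :: t) k = if a.1 == k then a.2 else pvLook t k := by
  unfold pvLook
  rw [show (PySem.Dict.mk (a :: t)) = (PySem.Dict.mk ((a.1, a.2) :: t)) by rfl]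
  rw [PySem.Dict.get?_mk_cons]
  by_cases h : a.1 == k <;> simp [h]

theorem lookup_eq (rc : List (String × String)) (kv : String × String)
    (hk : (rc.map Prod.fst).Nodup) (hm : kv ∈ rc) : pvLook rc kv.1 = kv.2 := by
  induction rc with
  | nil => cases hm
  | cons a t ih =>
    rw [pvLook_cons]
    rcases List.mem_cons.1 hm with h | h
    · subst h; simp
    · have hk2 := List.nodup_cons.1 (show (a.1 :: t.map Prod.fst).Nodup from hk)
      have ha : a.1 ∉ t.map Prod.fst := hk2.1
      have hne : ¬ (a.1 == kv.1) := by
        intro hbe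
        exact ha (by
          have : a.1 = kv.1 := by simpa using hbe
          rw [this]; exact List.mem_map_of_mem h)
      rw [if_neg hne]
      exact ih hk2.2 h

theorem foldl_add_exists_sublist {α : Type} [BEq α] (xs s : List α) :
    ∃ t, xs.foldl PySem.Set.add s = s ++ t ∧ t.Sublist xs := by
  induction xs generalizing s with
  | nil => exact ⟨[], by simp, by simp⟩
  | cons x xs ih =>
    simp only [List.foldl_cons]
    by_cases h : (PySem.Set.contains s x)
    · obtain ⟨t, h1, h2⟩ := ih s
      have hadd : PySem.Set.add s x = s := by simp only [PySem.Set.add]; rw [if_pos h]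
      exact ⟨t, by rw [hadd]; exact h1, h2.cons x⟩
    · obtain ⟨t, h1, h2⟩ := ih (s ++ [x])
      have hadd : PySem.Set.add s x = s ++ [x] := by simp only [PySem.Set.add]; rw [if_neg h]
      exact ⟨x :: t, by rw [hadd, h1, List.append_assoc]; rfl, h2.cons₂ x⟩

theorem ofList_sublist {α : Type} [BEq α] (xs : List α) :
    (PySem.Set.ofList xs).Sublist xs := by
  obtain ⟨t, h1, h2⟩ := foldl_add_exists_sublist xs []
  rw [PySem.Set.ofList_eq_foldl, h1]; simpa using h2

theorem dup_entries (rc : List (String × String))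
    (hk : (rc.map Prod.fst).Nodup) (hv : ¬ (rc.map Prod.snd).Nodup) :
    ∃ kv ∈ rc, ∃ cw ∈ rc, kv.1 ≠ cw.1 ∧ kv.2 = cw.2 := by
  induction rc with
  | nil => exact absurd List.nodup_nil hv
  | cons a t ih =>
    have hk' := List.nodup_cons.1 (show (a.1 :: t.map Prod.fst).Nodup from hk)
    by_cases hmem : a.2 ∈ t.map Prod.snd
    · obtain ⟨cw, hcw, hcw2⟩ := List.mem_map.1 hmem
      refine ⟨a, List.mem_cons_self, cw, List.mem_cons_of_mem _ hcw, ?_, hcw2.symm⟩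
      intro he
      exact hk'.1 (by rw [he]; exact List.mem_map_of_mem hcw)
    · have hvt : ¬ (t.map Prod.snd).Nodup := by
        intro h; exact hv (by simp [List.nodup_cons, hmem, h])
      obtain ⟨kv, h1, cw, h2, h3, h4⟩ := ih hk'.2 hvt
      exact ⟨kv, List.mem_cons_of_mem _ h1, cw, List.mem_cons_of_mem _ h2, h3, h4⟩

theorem inner_false_iff (rc : List (String × String)) (kv cw : String × String)
    (hk : (rc.map Prod.fst).Nodup) (hkv : kv ∈ rc) :
    ((if cw.1 == kv.1 then false
      else PySem.Str.startswith (pvLook rc kv.1) cw.2 || PySem.Str.startswith cw.2 (pvLook rc kv.1)) = false)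
    ↔ (cw.1 ≠ kv.1 → ¬ cw.2.toList <+: kv.2.toList ∧ ¬ kv.2.toList <+: cw.2.toList) := by
  rw [lookup_eq rc kv hk hkv]
  by_cases h : cw.1 = kv.1
  · simp [h]
  · have hb : (cw.1 == kv.1) = false := by simpa using h
    simp [hb, h, PySem.Str.startswith_eq, ← PySem.Chars.startswith_iff]

theorem A_iff (rc : List (String × String)) (hk : (rc.map Prod.fst).Nodup) :
    verify_prefix_free rc = true ↔
      ∀ kv ∈ rc, ∀ cw ∈ rc, cw.1 ≠ kv.1 → ¬ kv.2.toList <+: cw.2.toList := by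
  unfold verify_prefix_free
  rw [Bool.not_eq_true', List.any_eq_false]
  simp only [Bool.not_eq_true, List.any_eq_false]
  constructor
  · intro h kv hkv cw hcw hne hpre
    have h2 := h kv.1 (List.mem_map_of_mem hkv) cw hcw
    exact ((inner_false_iff rc kv cw hk hkv).1 h2 hne).2 hpre
  · intro h k hkmem
    obtain ⟨kv, hkv, rfl⟩ := List.mem_map.1 hkmem
    intro cw hcw
    refine (inner_false_iff rc kv cw hk hkv).2 (fun hne => ⟨?_, ?_⟩)
    · exact h cw hcw kv hkv (Ne.symm hne)
    · exact h kv hkv cw hcw hne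

theorem B_iff (rc : List (String × String)) (hv : (rc.map Prod.snd).Nodup) :
    verify_prefix_free_alt rc = true ↔
      ∀ w ∈ rc.map Prod.snd, ∀ i < w.length,
        PySem.Str.slice w none (some (i : Int)) ∉ rc.map Prod.snd := by
  simp only [verify_prefix_free_alt]
  rw [PySem.Set.ofList_eq_self_of_nodup _ hv]
  rw [if_neg (by rw [List.length_map]; exact lt_irrefl _)]
  rw [Bool.not_eq_true', List.any_eq_false]
  simp only [Bool.not_eq_true, List.any_eq_false, List.mem_range]
  constructor
  · intro h w hw i hi hmem
    have := h w hw i hi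
    rw [Bool.eq_false_iff] at this
    exact this ((PySem.Set.contains_iff _ _).2 hmem)
  · intro h w hw i hi
    rw [Bool.eq_false_iff]
    intro hc
    exact h w hw i hi ((PySem.Set.contains_iff _ _).1 hc)

theorem slice_toList (w : String) (i : Nat) :
    (PySem.Str.slice w none (some (i : Int))).toList = w.toList.take i := by
  rw [PySem.Str.toList_slice, PySem.Chars.slice_eq_listSlice, PySem.List.slice_to_natCast]

-- ===== VERDICT (by name: the statement is the Claim_ definition above) =====
theorem verify_prefix_free_spec : Claim_equal_verify_prefix_free := by
  intro rc _dom hk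
  unfold Spec_verify_prefix_free
  by_cases hv : (rc.map Prod.snd).Nodup
  · rw [Bool.eq_iff_iff, A_iff rc hk, B_iff rc hv]
    constructor
    · intro R w hw i hi hmem
      obtain ⟨cw, hcw, rfl⟩ := List.mem_map.1 hw
      obtain ⟨kv, hkv, hkv2⟩ := List.mem_map.1 hmem
      have hQ : cw.2.toList.length = cw.2.length := by simp
      have hlen : kv.2.toList.length = i := by
        rw [hkv2, slice_toList, List.length_take]
        omega
      have hpre : kv.2.toList <+: cw.2.toList := by
        rw [hkv2, slice_toList]; exact List.take_prefix i _
      have hne : cw.1 ≠ kv.1 := by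
        intro he
        have hekv : kv = cw := List.inj_on_of_nodup_map hk hkv hcw he.symm
        have : cw.2.toList.length = i := by rw [← hekv]; exact hlen
        omega
      exact R kv hkv cw hcw hne hpre
    · intro Bc kv hkv cw hcw hne hpre
      rcases lt_or_eq_of_le hpre.length_le with hlt | heq
      · have hQ : cw.2.toList.length = cw.2.length := by simp
        refine Bc cw.2 (List.mem_map_of_mem hcw) kv.2.toList.length (by omega) ?_
        have hs : PySem.Str.slice cw.2 none (some (kv.2.toList.length : Int)) = kv.2 := by
          apply String.toList_inj.mp
          rw [slice_toList]
          exact (List.prefix_iff_eq_take.1 hpre).symm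
        rw [hs]; exact List.mem_map_of_mem hkv
      · have h2 : kv.2 = cw.2 := String.toList_inj.mp (hpre.eq_of_length heq)
        have hekv : kv = cw := List.inj_on_of_nodup_map (f := Prod.snd) hv hkv hcw h2
        exact absurd (congrArg Prod.fst hekv).symm hne
  · obtain ⟨kv, hkv, cw, hcw, hne, heq⟩ := dup_entries rc hk hv
    have hA : verify_prefix_free rc = false := by
      unfold verify_prefix_free
      rw [Bool.not_eq_false']
      rw [List.any_eq_true]
      refine ⟨kv.1, List.mem_map_of_mem hkv, ?_⟩
      rw [List.any_eq_true]
      refine ⟨cw, hcw, ?_⟩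
      rw [lookup_eq rc kv hk hkv,
        if_neg (show ¬((cw.1 == kv.1) = true) by simpa using (Ne.symm hne))]
      apply Bool.or_eq_true_iff.2
      left
      rw [PySem.Str.startswith_eq, PySem.Chars.startswith_iff, heq]
    have hB : verify_prefix_free_alt rc = false := by
      simp only [verify_prefix_free_alt]
      rw [if_pos]
      have hsub := ofList_sublist (rc.map Prod.snd)
      rcases lt_or_eq_of_le hsub.length_le with h | h
      · simpa [List.length_map] using h
      · exfalso
        have := hsub.eq_of_length h
        have hnod := PySem.Set.nodup_ofList (xs := rc.map Prod.snd)
        rw [this] at hnod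
        exact hv hnod
    rw [hA, hB]
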